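-- pv_equiv track=rewrite | github.com/WalkerWhite/introcs-python | introcs/tuples.py | replace_tup
-- ===== SOURCE A (Python) =====
-- def replace_tup(tupl, old, new, count=-1):
--     """
--     Creates a copy of ``tupl`` with all occurrences of value ``old`` replaced by ``new``.
--
--     Objects are replaced by value equality, not id equality (i.e. ``==`` not ``is``).
--     If the optional argument ``count`` is given, only the first count occurrences are
--     replaced.
--
--     :param tupl: The tuple to copy
--     :type tupl:  ``tuple``
--
--     :param old: The old value to replace
--     :type old:  ``any``
--
--     :param new: The new value to replace with
--     :type new:  ``any``
--
--     :param count: The number of occurrences to replace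
--     :type count:  ``int``
--
--     :return: A copy of ``tupl`` with all occurrences of value ``old`` replaced by ``new``.
--     :rtype:  ``tuple``
--     """
--     assert type(tupl) == tuple, '%s is not a tuple' % tupl
--     result = []
--     count = len(tupl) if count == -1 else count
--     match = 0
--     for item in tupl:
--         if item == old and match < count:
--             result.append(new)
--             match += 1
--         else:
--             result.append(item)
--     return tuple(result)
-- ===== SOURCE B (Python) =====
-- def replace_tup(tupl, old, new, count=-1):
--     assert type(tupl) == tuple, '%s is not a tuple' % tupl
--     limit = len(tupl) if count == -1 else count
--     result = list(tupl)
--     start = 0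
--     for _ in range(limit):
--         try:
--             idx = result.index(old, start)
--         except ValueError:
--             break
--         result[idx] = new
--         start = idx + 1
--     return tuple(result)
-- ===== Notes on version B (the rewrite author's own statement) =====
-- stated objective: alternative
-- what changed: B replaces the single scan with a match counter by repeated list.index(old, start) searches that jump directly to each of the first `limit` occurrences and overwrite them in place.
import Mathlib
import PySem

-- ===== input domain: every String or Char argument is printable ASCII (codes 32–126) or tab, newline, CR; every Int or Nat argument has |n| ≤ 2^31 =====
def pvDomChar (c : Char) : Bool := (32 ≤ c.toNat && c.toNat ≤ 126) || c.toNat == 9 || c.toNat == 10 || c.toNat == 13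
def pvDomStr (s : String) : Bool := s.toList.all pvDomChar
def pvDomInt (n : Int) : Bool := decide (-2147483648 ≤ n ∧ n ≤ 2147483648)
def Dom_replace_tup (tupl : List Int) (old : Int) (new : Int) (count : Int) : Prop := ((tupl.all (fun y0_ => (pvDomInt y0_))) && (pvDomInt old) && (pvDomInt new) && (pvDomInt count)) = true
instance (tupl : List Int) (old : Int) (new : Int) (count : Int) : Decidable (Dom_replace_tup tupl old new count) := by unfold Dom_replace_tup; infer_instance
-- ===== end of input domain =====

-- B replaces A's single counting scan by repeated index-searches that jump to each
-- occurrence and overwrite it in place; same cost, different control flow (objective: alternative).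

-- ===== PORT A =====
-- literal port of A: scan `tupl`, appending `new` while `match < count`, else the item
def replace_tup (tupl : List Int) (old : Int) (new : Int) (count : Int) : List Int :=
  let count' : Int := if count = -1 then (tupl.length : Int) else count
  (tupl.foldl
    (fun (st : List Int × Int) item =>
      if item = old ∧ st.2 < count' then (st.1 ++ [new], st.2 + 1) else (st.1 ++ [item], st.2))
    ([], 0)).1

-- ===== PORT B =====
-- hand port of Python's `result.index(old, start)`: first index ≥ start holding `old`,
-- none = ValueError (exact: list.index searches from `start` left to right)
def pvIndexFrom (res : List Int) (old : Int) (start : Nat) : Option Nat :=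
  ((res.drop start).findIdx? (fun x => x == old)).map (· + start)

-- the `for _ in range(limit)` loop of Source B: try index / except break / set / advance start
def pvAltLoop (old new : Int) : Nat → List Int → Nat → List Int
  | 0, res, _ => res
  | n + 1, res, start =>
    match pvIndexFrom res old start with
    | none => res
    | some idx => pvAltLoop old new n (res.set idx new) (idx + 1)

def replace_tup_alt (tupl : List Int) (old : Int) (new : Int) (count : Int) : List Int :=
  let limit : Int := if count = -1 then (tupl.length : Int) else count
  pvAltLoop old new limit.toNat tupl 0

-- ===== PRECONDITION & SPEC =====
def Spec_replace_tup (tupl : List Int) (old : Int) (new : Int) (count : Int) (out : List Int) : Prop := out = replace_tup_alt tupl old new count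
instance (tupl : List Int) (old : Int) (new : Int) (count : Int) (out : List Int) : Decidable (Spec_replace_tup tupl old new count out) := by unfold Spec_replace_tup; infer_instance

-- ===== CLAIM (what is proved, stated in full; the proofs are below) =====
def Claim_equal_replace_tup : Prop := ∀ (tupl : List Int) (old : Int) (new : Int) (count : Int), Dom_replace_tup tupl old new count → Spec_replace_tup tupl old new count (replace_tup tupl old new count)

-- ===== LEMMAS AND PROOFS =====

-- canonical form: replace the first k occurrences of `old` by `new`
def repk (old new : Int) : List Int → Nat → List Int
  | [], _ => []
  | x :: xs, k => if x = old ∧ 0 < k then new :: repk old new xs (k - 1) else x :: repk old new xs k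

theorem repk_zero (old new : Int) : ∀ s : List Int, repk old new s 0 = s := by
  intro s; induction s with
  | nil => rfl
  | cons x xs ih => simp [repk, ih]

theorem repk_no_occ (old new : Int) : ∀ (s : List Int) (k : Nat),
    (∀ x ∈ s, ¬ x = old) → repk old new s k = s := by
  intro s; induction s with
  | nil => intro k _; rfl
  | cons x xs ih =>
    intro k h
    have hx : ¬ x = old := h x (by simp)
    simp [repk, hx, ih k (fun y hy => h y (by simp [hy]))]

theorem repk_split (old new : Int) : ∀ (s : List Int) (j k : Nat),
    s.findIdx? (fun x => x == old) = some j →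
    repk old new s (k + 1) = s.take j ++ new :: repk old new (s.drop (j + 1)) k := by
  intro s; induction s with
  | nil => intro j k h; simp [List.findIdx?, List.findIdx?.go] at h
  | cons x xs ih =>
    intro j k h
    rw [List.findIdx?_cons] at h
    by_cases hx : x = old
    · simp [hx] at h
      subst h
      simp [repk, hx]
    · have hbx : (x == old) = false := by simp [hx]
      rw [hbx] at h; simp at h
      obtain ⟨j', hj', rfl⟩ := h
      simp [repk, hx]
      exact ih j' k hj'

theorem altLoop_eq (old new : Int) : ∀ (n : Nat) (pre suf : List Int),
    pvAltLoop old new n (pre ++ suf) pre.length = pre ++ repk old new suf n := by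
  intro n
  induction n with
  | zero => intro pre suf; simp [pvAltLoop, repk_zero]
  | succ n ih =>
    intro pre suf
    show (match pvIndexFrom (pre ++ suf) old pre.length with
      | none => pre ++ suf
      | some idx => pvAltLoop old new n ((pre ++ suf).set idx new) (idx + 1))
      = pre ++ repk old new suf (n + 1)
    rw [pvIndexFrom, List.drop_left]
    cases h : suf.findIdx? (fun x => x == old) with
    | none =>
      have : ∀ x ∈ suf, ¬ x = old := by
        intro x hx
        have := List.findIdx?_eq_none_iff.mp h
        simpa using this x hx
      simp [repk_no_occ old new suf (n + 1) this]
    | some j =>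
      have hj : j < suf.length := List.findIdx?_eq_some_iff_findIdx_eq.mp h |>.1
      simp only [Option.map_some]
      have hset : (pre ++ suf).set (j + pre.length) new = pre ++ suf.set j new := by
        rw [List.set_append]
        simp
      have hsuf : suf.set j new = suf.take j ++ new :: suf.drop (j + 1) := by
        rw [List.set_eq_take_append_cons_drop, if_pos hj]
      have hlen : (pre ++ (suf.take j ++ [new])).length = j + pre.length + 1 := by
        simp [List.length_take, Nat.min_eq_left (Nat.le_of_lt hj)]; omega
      rw [hset, hsuf]
      have harr : pre ++ (suf.take j ++ new :: suf.drop (j + 1))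
          = (pre ++ (suf.take j ++ [new])) ++ suf.drop (j + 1) := by
        simp
      rw [harr, show j + pre.length + 1 = (pre ++ (suf.take j ++ [new])).length from hlen.symm,
        ih (pre ++ (suf.take j ++ [new])) (suf.drop (j + 1)),
        repk_split old new suf j n h]
      simp

theorem fold_eq (old new count' : Int) : ∀ (xs acc : List Int) (m : Nat),
    (List.foldl
      (fun (st : List Int × Int) item =>
        if item = old ∧ st.2 < count' then (st.1 ++ [new], st.2 + 1) else (st.1 ++ [item], st.2))
      (acc, (m : Int)) xs).1
    = acc ++ repk old new xs (count'.toNat - m) := by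
  intro xs
  induction xs with
  | nil => intro acc m; simp [repk]
  | cons x xs ih =>
    intro acc m
    by_cases hcond : x = old ∧ (m : Int) < count'
    · have hk : 0 < count'.toNat - m := by omega
      have : ((m : Int) + 1) = ((m + 1 : Nat) : Int) := by push_cast; ring
      simp only [List.foldl_cons, if_pos hcond, this, ih]
      rw [repk, if_pos ⟨hcond.1, hk⟩]
      have : count'.toNat - m - 1 = count'.toNat - (m + 1) := by omega
      simp [this]
    · have hk : ¬ (x = old ∧ 0 < count'.toNat - m) := by
        rintro ⟨hx, hlt⟩
        exact hcond ⟨hx, by omega⟩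
      simp only [List.foldl_cons, if_neg hcond, ih]
      rw [repk, if_neg hk]
      simp

-- ===== VERDICT (by name: the statement is the Claim_ definition above) =====
theorem replace_tup_spec : Claim_equal_replace_tup := by
  intro tupl old new count _
  unfold Spec_replace_tup replace_tup replace_tup_alt
  have hA := fold_eq old new (if count = -1 then (tupl.length : Int) else count) tupl [] 0
  have hB := altLoop_eq old new (if count = -1 then (tupl.length : Int) else count).toNat [] tupl
  simp only [Nat.cast_zero] at hA
  simp only [List.nil_append, List.length_nil] at hA hB
  simp [hA, hB]
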